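-- pv_equiv track=rewrite | github.com/ahmadsqalli/kasiski | kasiski/ngram.py | trigram_substitute
-- ===== SOURCE A (Python) =====
-- def trigram_substitute(plaintext, tri_dict):
--
--     pt_arr, pt_len = list(plaintext), len(plaintext)
--
--     final_text = ''
--
--     skip = 0
--     for i, char in enumerate(pt_arr):
--         '''
--         -2 and -3
--         i and pt_arr diff starting values
--         same as pt_arr[-2/-3]
--         '''
--         if skip == 0:
--
--             if i > pt_len-3:
--                 # POST-PENULTIMATE
--                 final_text += char
--             else:
--
--                 current_bigram = ''.join(char + pt_arr[i+1] + pt_arr[i+2])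
--
--                 if char.isalpha() and pt_arr[i+1].isalpha() and pt_arr[i+2].isalpha() and current_bigram in tri_dict:
--
--                     final_text += tri_dict[current_bigram]
--                     skip = 2
--
--                 else:
--                     final_text += char
--
--         else:
--             skip -=1
--
--     return final_text
-- ===== SOURCE B (Python) =====
-- def trigram_substitute(plaintext, tri_dict):
--     # Stage 1: split the text into maximal runs of alphabetic / non-alphabetic characters.
--     runs = []
--     for ch in plaintext:
--         f = ch.isalpha()
--         if runs and runs[-1][0] == f:
--             runs[-1][1].append(ch)
--         else:
--             runs.append((f, [ch]))
--     # Stage 2: non-alphabetic runs are copied verbatim; inside each alphabetic run,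
--     # greedily replace dictionary trigrams (no per-character isalpha tests needed).
--     pieces = []
--     for f, chars in runs:
--         if not f:
--             pieces.extend(chars)
--         else:
--             j = 0
--             while j < len(chars):
--                 key = ''.join(chars[j:j + 3])
--                 if len(key) == 3 and key in tri_dict:
--                     pieces.append(tri_dict[key])
--                     j += 3
--                 else:
--                     pieces.append(chars[j])
--                     j += 1
--     return ''.join(pieces)
-- ===== Notes on version B (the rewrite author's own statement) =====
-- stated objective: alternative
-- what changed: Replaced A's single indexed pass with a skip counter by a staged algorithm: first split the text into maximal alphabetic/non-alphabetic runs, then copy non-alphabetic runs verbatim and greedily replace dictionary trigrams inside each alphabetic run (where no per-character isalpha tests are needed), joining the pieces at the end.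
import Mathlib
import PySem

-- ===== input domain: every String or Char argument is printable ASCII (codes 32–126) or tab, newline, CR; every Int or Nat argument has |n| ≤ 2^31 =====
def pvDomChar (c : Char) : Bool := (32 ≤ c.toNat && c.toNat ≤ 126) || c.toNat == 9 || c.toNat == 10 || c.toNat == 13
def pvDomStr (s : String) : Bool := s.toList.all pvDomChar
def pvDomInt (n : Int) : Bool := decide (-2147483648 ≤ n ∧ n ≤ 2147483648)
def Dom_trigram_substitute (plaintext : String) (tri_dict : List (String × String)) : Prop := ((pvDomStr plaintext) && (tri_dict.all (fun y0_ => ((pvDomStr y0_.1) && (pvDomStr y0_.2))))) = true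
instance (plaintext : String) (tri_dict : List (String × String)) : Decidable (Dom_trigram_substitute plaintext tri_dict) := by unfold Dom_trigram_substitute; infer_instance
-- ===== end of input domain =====

-- B is a staged algorithm: first split the text into maximal alphabetic/non-alphabetic runs,
-- then replace trigrams only inside alphabetic runs (no per-char isalpha test there); objective: alternative.

-- ===== PORT A =====
-- loop body of A's 'for i, char in enumerate(pt_arr)' (state = (final_text, skip))
def tsStepA (pt : List Char) (d : List (String × String)) (st : List Char × Int) (p : Int × Char) : List Char × Int :=
  if st.2 = 0 then
    if p.1 > (pt.length : Int) - 3 then (st.1 ++ [p.2], st.2)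
    else
      let c1 := PySem.List.pyGetD pt (p.1 + 1) ' '
      let c2 := PySem.List.pyGetD pt (p.1 + 2) ' '
      let bigram := String.mk [p.2, c1, c2]
      if PySem.Chars.isalpha p.2 && PySem.Chars.isalpha c1 && PySem.Chars.isalpha c2
          && (PySem.Dict.mk d).contains bigram then
        (st.1 ++ (((PySem.Dict.mk d).get? bigram).getD "").toList, 2)
      else (st.1 ++ [p.2], st.2)
  else (st.1, st.2 - 1)

def trigram_substitute (plaintext : String) (tri_dict : List (String × String)) : String :=
  String.mk ((PySem.List.enumerate plaintext.toList 0).foldl (tsStepA plaintext.toList tri_dict) ([], 0)).1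

-- ===== PORT B =====
-- stage 1 of B: body of 'for ch in plaintext' building maximal isalpha-runs (append to last run or start a new one)
def tsRunsStep (acc : List (Bool × List Char)) (c : Char) : List (Bool × List Char) :=
  let f := PySem.Chars.isalpha c
  match acc.getLast? with
  | some r => if r.1 = f then acc.dropLast ++ [(r.1, r.2 ++ [c])] else acc ++ [(f, [c])]
  | none => acc ++ [(f, [c])]

def tsRuns (l : List Char) : List (Bool × List Char) := l.foldl tsRunsStep []

-- stage 2 of B: the 'while j < len(chars)' loop inside one alphabetic run ('pieces' is the shared output list,
-- ''.join ported as flat char accumulation)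
def tsRunLoop (d : List (String × String)) (chars : List Char) (j : Nat) (pieces : List Char) : List Char :=
  if _h : j < chars.length then
    let key := PySem.List.slice chars (some (j : Int)) (some ((j : Int) + 3))
    if key.length = 3 && (PySem.Dict.mk d).contains (String.mk key) then
      tsRunLoop d chars (j + 3) (pieces ++ (((PySem.Dict.mk d).get? (String.mk key)).getD "").toList)
    else
      tsRunLoop d chars (j + 1) (pieces ++ [chars.getD j ' '])
  else pieces
termination_by chars.length - j

def trigram_substitute_alt (plaintext : String) (tri_dict : List (String × String)) : String :=
  String.mk ((tsRuns plaintext.toList).foldl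
    (fun pieces r => if r.1 then tsRunLoop tri_dict r.2 0 pieces else pieces ++ r.2) [])

-- ===== PRECONDITION & SPEC =====
def Spec_trigram_substitute (plaintext : String) (tri_dict : List (String × String)) (out : String) : Prop := out = trigram_substitute_alt plaintext tri_dict
instance (plaintext : String) (tri_dict : List (String × String)) (out : String) : Decidable (Spec_trigram_substitute plaintext tri_dict out) := by unfold Spec_trigram_substitute; infer_instance

-- ===== CLAIM (what is proved, stated in full; the proofs are below) =====
def Claim_equal_trigram_substitute : Prop := ∀ (plaintext : String) (tri_dict : List (String × String)), Dom_trigram_substitute plaintext tri_dict → Spec_trigram_substitute plaintext tri_dict (trigram_substitute plaintext tri_dict)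

-- ===== LEMMAS AND PROOFS =====

-- common reference recursion: greedy trigram replacement over a character list
def tsSpec (d : List (String × String)) : List Char → List Char
  | c1 :: c2 :: c3 :: rest =>
    if PySem.Chars.isalpha c1 && PySem.Chars.isalpha c2 && PySem.Chars.isalpha c3
        && (PySem.Dict.mk d).contains (String.mk [c1, c2, c3]) then
      (((PySem.Dict.mk d).get? (String.mk [c1, c2, c3])).getD "").toList ++ tsSpec d rest
    else c1 :: tsSpec d (c2 :: c3 :: rest)
  | l => l

lemma tsSpec_short (d : List (String × String)) (l : List Char) (h : l.length < 3) :
    tsSpec d l = l := by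
  match l, h with
  | [], _ => rfl
  | [c], _ => rfl
  | [c1, c2], _ => rfl

lemma tsSpec_cons (d : List (String × String)) (c : Char) (t : List Char)
    (h : ∀ c2 c3 r, t = c2 :: c3 :: r →
      (PySem.Chars.isalpha c && PySem.Chars.isalpha c2 && PySem.Chars.isalpha c3
        && (PySem.Dict.mk d).contains (String.mk [c, c2, c3])) = false) :
    tsSpec d (c :: t) = c :: tsSpec d t := by
  match t with
  | [] => rfl
  | [c2] => rfl
  | c2 :: c3 :: r =>
    have hf := h c2 c3 r rfl
    rw [tsSpec, if_neg (by rw [hf]; exact Bool.false_ne_true)]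

-- ===== A equals the reference recursion =====
lemma ts_fold_spec (pt : List Char) (d : List (String × String)) :
    ∀ n i acc, pt.length - i = n →
    (PySem.List.enumerate (pt.drop i) (i : Int)).foldl (tsStepA pt d) (acc, 0)
      = (acc ++ tsSpec d (pt.drop i), 0) := by
  intro n
  induction n using Nat.strong_induction_on with
  | _ n IH =>
  intro i acc hn
  by_cases h : i < pt.length
  · rw [List.drop_eq_getElem_cons h, PySem.List.enumerate_cons, List.foldl_cons]
    by_cases h3 : i + 3 ≤ pt.length
    · have hnot : ¬ ((i:Int) > (pt.length:Int) - 3) := by omega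
      have h1 : i + 1 < pt.length := by omega
      have h2 : i + 2 < pt.length := by omega
      have hval1 : PySem.List.pyGetD pt ((i:Int)+1) ' ' = pt[i+1] := by
        rw [show ((i:Int)+1) = ((i+1:Nat):Int) by push_cast; ring, PySem.List.pyGetD_natCast]
        exact List.getD_eq_getElem _ _ h1
      have hval2 : PySem.List.pyGetD pt ((i:Int)+2) ' ' = pt[i+2] := by
        rw [show ((i:Int)+2) = ((i+2:Nat):Int) by push_cast; ring, PySem.List.pyGetD_natCast]
        exact List.getD_eq_getElem _ _ h2
      have hstep : tsStepA pt d (acc, 0) ((i:Int), pt[i]) =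
          if (PySem.Chars.isalpha pt[i] && PySem.Chars.isalpha pt[i+1]
              && PySem.Chars.isalpha pt[i+2]
              && (PySem.Dict.mk d).contains (String.mk [pt[i], pt[i+1], pt[i+2]])) = true then
            (acc ++ (((PySem.Dict.mk d).get?
              (String.mk [pt[i], pt[i+1], pt[i+2]])).getD "").toList, 2)
          else (acc ++ [pt[i]], 0) := by
        simp only [tsStepA, hval1, hval2, if_neg hnot, if_true]
      rw [hstep]
      by_cases hm : (PySem.Chars.isalpha pt[i] && PySem.Chars.isalpha pt[i+1]
          && PySem.Chars.isalpha pt[i+2]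
          && (PySem.Dict.mk d).contains (String.mk [pt[i], pt[i+1], pt[i+2]])) = true
      · rw [if_pos hm]
        rw [List.drop_eq_getElem_cons h1, PySem.List.enumerate_cons, List.foldl_cons]
        rw [List.drop_eq_getElem_cons h2, PySem.List.enumerate_cons, List.foldl_cons]
        have hskip2 : ∀ (a : List Char) (p : Int × Char), tsStepA pt d (a, 2) p = (a, 1) := by
          intro a p; simp [tsStepA]
        have hskip1 : ∀ (a : List Char) (p : Int × Char), tsStepA pt d (a, 1) p = (a, 0) := by
          intro a p; simp [tsStepA]
        rw [hskip2, hskip1]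
        rw [show ((i:Int)+1+1+1) = ((i+3:Nat):Int) by push_cast; ring]
        rw [IH (pt.length - (i+3)) (by omega) (i+3) _ rfl]
        rw [show i+2+1 = i+3 from by omega, tsSpec, if_pos hm, List.append_assoc]
      · rw [if_neg hm]
        rw [show ((i:Int)+1) = ((i+1:Nat):Int) by push_cast; ring]
        rw [IH (pt.length - (i+1)) (by omega) (i+1) _ rfl]
        have : tsSpec d (pt[i] :: pt.drop (i+1)) = pt[i] :: tsSpec d (pt.drop (i+1)) := by
          rw [List.drop_eq_getElem_cons h1, show i+1+1 = i+2 from by omega,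
            List.drop_eq_getElem_cons h2, tsSpec, if_neg hm]
        rw [this]; simp
    · have hgt : ((i:Int) > (pt.length:Int) - 3) := by omega
      have hstep : tsStepA pt d (acc, 0) ((i:Int), pt[i]) = (acc ++ [pt[i]], 0) := by
        simp only [tsStepA, if_pos hgt, if_true]
      rw [hstep]
      rw [show ((i:Int)+1) = ((i+1:Nat):Int) by push_cast; ring]
      rw [IH (pt.length - (i+1)) (by omega) (i+1) _ rfl]
      have hs1 : tsSpec d (pt[i] :: pt.drop (i+1)) = pt[i] :: pt.drop (i+1) :=
        tsSpec_short d _ (by simp [List.length_drop]; omega)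
      have hs2 : tsSpec d (pt.drop (i+1)) = pt.drop (i+1) :=
        tsSpec_short d _ (by rw [List.length_drop]; omega)
      rw [hs1, hs2]; simp
  · have hdrop : pt.drop i = [] := List.drop_eq_nil_of_le (by omega)
    rw [hdrop, PySem.List.enumerate_nil, List.foldl_nil, tsSpec_short d [] (by simp)]
    simp

-- ===== B equals the reference recursion =====
-- the per-run while loop, on an all-alphabetic run followed by a non-alphabetic (or empty) remainder
lemma tsRunLoop_spec (d : List (String × String)) (chars rest : List Char)
    (hA : ∀ c ∈ chars, PySem.Chars.isalpha c = true)
    (hR : ∀ x, rest.head? = some x → PySem.Chars.isalpha x = false) :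
    ∀ n j pieces, chars.length - j = n →
    tsRunLoop d chars j pieces ++ tsSpec d rest
      = pieces ++ tsSpec d (chars.drop j ++ rest) := by
  intro n
  induction n using Nat.strong_induction_on with
  | _ n IH =>
  intro j pieces hn
  rw [tsRunLoop]
  by_cases h : j < chars.length
  · rw [dif_pos h]
    have hkey : PySem.List.slice chars (some (j : Int)) (some ((j : Int) + 3))
        = (chars.drop j).take 3 := by
      have := PySem.List.slice_natCast_add chars j 3
      simpa using this
    have hgd : chars.getD j ' ' = chars[j] := List.getD_eq_getElem _ _ h
    by_cases h3 : j + 3 ≤ chars.length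
    · have h1 : j + 1 < chars.length := by omega
      have h2 : j + 2 < chars.length := by omega
      have hdropj : chars.drop j = chars[j] :: chars[j+1] :: chars[j+2] :: chars.drop (j+3) := by
        rw [List.drop_eq_getElem_cons h, List.drop_eq_getElem_cons h1, List.drop_eq_getElem_cons h2,
          show j+2+1 = j+3 from by omega]
      have htake : (chars.drop j).take 3 = [chars[j], chars[j+1], chars[j+2]] := by
        rw [hdropj]; rfl
      have hlen : ((chars.drop j).take 3).length = 3 := by rw [htake]; rfl
      have ha0 := hA chars[j] (List.getElem_mem h)
      have ha1 := hA chars[j+1] (List.getElem_mem h1)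
      have ha2 := hA chars[j+2] (List.getElem_mem h2)
      by_cases hc : (PySem.Dict.mk d).contains (String.mk [chars[j], chars[j+1], chars[j+2]]) = true
      · rw [hkey, htake, if_pos (by simp [hc])]
        rw [IH (chars.length - (j+3)) (by omega) (j+3) _ rfl]
        rw [hdropj, List.cons_append, List.cons_append, List.cons_append, tsSpec,
          if_pos (by simp [ha0, ha1, ha2, hc]), List.append_assoc]
      · rw [hkey, htake, if_neg (by simp [hc])]
        rw [IH (chars.length - (j+1)) (by omega) (j+1) _ rfl]
        have hdropj1 : chars.drop (j+1) = chars[j+1] :: chars[j+2] :: chars.drop (j+3) := by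
          rw [List.drop_eq_getElem_cons h1, List.drop_eq_getElem_cons h2,
            show j+2+1 = j+3 from by omega]
        have : tsSpec d (chars.drop j ++ rest)
            = chars[j] :: tsSpec d (chars.drop (j+1) ++ rest) := by
          rw [hdropj, hdropj1, List.cons_append, List.cons_append, List.cons_append, tsSpec,
            if_neg (by simp [hc])]
        rw [this, hgd]; simp
    · -- fewer than 3 characters left in this run: the slice is short, copy one char
      have hlenlt : ((chars.drop j).take 3).length < 3 := by
        rw [List.length_take, List.length_drop]; omega
      rw [hkey, if_neg (by simp; omega)]
      rw [IH (chars.length - (j+1)) (by omega) (j+1) _ rfl]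
      have hcons : tsSpec d (chars.drop j ++ rest)
          = chars[j] :: tsSpec d (chars.drop (j+1) ++ rest) := by
        rw [List.drop_eq_getElem_cons h, List.cons_append]
        apply tsSpec_cons
        intro c2 c3 r heq
        -- the 2nd or 3rd char comes from `rest`, whose head is non-alphabetic
        have hlen1 : (chars.drop (j+1)).length ≤ 1 := by rw [List.length_drop]; omega
        rcases hd : chars.drop (j+1) with _ | ⟨x, xs⟩
        · rw [hd, List.nil_append] at heq
          have : PySem.Chars.isalpha c2 = false := hR c2 (by rw [heq]; rfl)
          simp [this]
        · have hxs : xs = [] := by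
            have := hlen1; rw [hd] at this; simp at this; exact this
          rw [hd, hxs] at heq
          rcases rest with _ | ⟨y, ys⟩
          · simp at heq
          · have hy : PySem.Chars.isalpha y = false := hR y rfl
            simp at heq
            obtain ⟨hx, hy2, _⟩ := heq
            rw [← hy2]; simp [hy]
      rw [hcons, hgd]; simp
  · rw [dif_neg h]
    rw [List.drop_eq_nil_of_le (by omega), List.nil_append]
-- run-list invariant produced by stage 1
def tsRunsInv (rs : List (Bool × List Char)) : Prop :=
  (∀ r ∈ rs, r.2 ≠ [] ∧ ∀ c ∈ r.2, PySem.Chars.isalpha c = r.1) ∧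
  rs.IsChain (fun a b => a.1 ≠ b.1)

lemma tsRunsStep_inv (acc : List (Bool × List Char)) (c : Char) (hinv : tsRunsInv acc) :
    tsRunsInv (tsRunsStep acc c) ∧
    ((tsRunsStep acc c).map Prod.snd).flatten = (acc.map Prod.snd).flatten ++ [c] := by
  rcases acc.eq_nil_or_concat with rfl | ⟨ys, r, rfl⟩
  · refine ⟨⟨?_, by simp [tsRunsStep]⟩, by simp [tsRunsStep]⟩
    intro r hr
    simp [tsRunsStep] at hr
    subst hr
    exact ⟨by simp, by intro ch hch; simp at hch; subst hch; rfl⟩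
  · simp only [List.concat_eq_append] at hinv ⊢
    have hstep : tsRunsStep (ys ++ [r]) c =
        if r.1 = PySem.Chars.isalpha c then ys ++ [(r.1, r.2 ++ [c])]
        else (ys ++ [r]) ++ [(PySem.Chars.isalpha c, [c])] := by
      simp [tsRunsStep]
    obtain ⟨hmem, hch⟩ := hinv
    by_cases hf : r.1 = PySem.Chars.isalpha c
    · rw [hstep, if_pos hf]
      refine ⟨⟨?_, ?_⟩, by simp⟩
      · intro r' hr'
        rcases List.mem_append.mp hr' with hy | hx
        · exact hmem r' (by simp [hy])
        · simp at hx; subst hx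
          obtain ⟨hne, hall⟩ := hmem r (by simp)
          refine ⟨by simp, ?_⟩
          intro ch hch2
          rcases List.mem_append.mp hch2 with h1 | h1
          · exact hall ch h1
          · simp at h1; subst h1; exact hf.symm
      · rw [List.isChain_append] at hch ⊢
        obtain ⟨h1, _, h3⟩ := hch
        refine ⟨h1, List.isChain_singleton _, ?_⟩
        intro x hx y hy
        simp at hy; subst hy
        exact h3 x hx r (by simp)
    · rw [hstep, if_neg hf]
      refine ⟨⟨?_, ?_⟩, by simp⟩
      · intro r' hr'
        rcases List.mem_append.mp hr' with hy | hx
        · exact hmem r' hy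
        · simp at hx; subst hx
          exact ⟨by simp, by intro ch hch2; simp at hch2; subst hch2; rfl⟩
      · rw [List.isChain_append]
        refine ⟨hch, List.isChain_singleton _, ?_⟩
        intro x hx y hy
        simp at hy; subst hy
        have hx' : r = x := by simpa using hx
        subst hx'
        simpa using hf

lemma tsRuns_aux : ∀ (l : List Char) (acc : List (Bool × List Char)), tsRunsInv acc →
    tsRunsInv (l.foldl tsRunsStep acc) ∧
    ((l.foldl tsRunsStep acc).map Prod.snd).flatten = (acc.map Prod.snd).flatten ++ l := by
  intro l
  induction l with
  | nil => intro acc hinv; exact ⟨hinv, by simp⟩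
  | cons c t IH =>
    intro acc hinv
    have hstep := tsRunsStep_inv acc c hinv
    have := IH (tsRunsStep acc c) hstep.1
    refine ⟨this.1, ?_⟩
    rw [List.foldl_cons, this.2, hstep.2, List.append_assoc]
    rfl

lemma tsSpec_nonalpha_append (d : List (String × String)) :
    ∀ (cs rest : List Char), (∀ c ∈ cs, PySem.Chars.isalpha c = false) →
    tsSpec d (cs ++ rest) = cs ++ tsSpec d rest := by
  intro cs
  induction cs with
  | nil => intro rest _; simp
  | cons c t IH =>
    intro rest hna
    have hc : PySem.Chars.isalpha c = false := hna c (by simp)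
    rw [List.cons_append, tsSpec_cons d c (t ++ rest) (by intro c2 c3 r heq; simp [hc]),
      IH rest (fun x hx => hna x (by simp [hx]))]
    simp

lemma tsProcess_spec (d : List (String × String)) :
    ∀ (rs : List (Bool × List Char)) (init : List Char), tsRunsInv rs →
    rs.foldl (fun pieces r => if r.1 then tsRunLoop d r.2 0 pieces else pieces ++ r.2) init
      = init ++ tsSpec d ((rs.map Prod.snd).flatten) := by
  intro rs
  induction rs with
  | nil => intro init _; simp [tsSpec_short d [] (by simp)]
  | cons r rest IH =>
    intro init hinv
    obtain ⟨hmem, hch⟩ := hinv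
    have hinv' : tsRunsInv rest := ⟨fun x hx => hmem x (by simp [hx]), hch.tail⟩
    obtain ⟨hne, hall⟩ := hmem r (by simp)
    rw [List.foldl_cons, IH _ hinv']
    by_cases hf : r.1 = true
    · -- alphabetic run: inner while loop
      have hRrest : ∀ x, ((rest.map Prod.snd).flatten).head? = some x →
          PySem.Chars.isalpha x = false := by
        intro x hx
        cases rest with
        | nil => simp at hx
        | cons r2 rest2 =>
          obtain ⟨hne2, hall2⟩ := hmem r2 (by simp)
          have hflag : r2.1 = false := by
            have h12 : r.1 ≠ r2.1 := (List.isChain_cons.mp hch).1 r2 (by simp)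
            cases hb : r2.1 with
            | false => rfl
            | true => exact absurd (hf.trans hb.symm) h12
          have hhd : (((r2 :: rest2).map Prod.snd).flatten).head? = r2.2.head? := by
            simp only [List.map_cons, List.flatten_cons]
            cases hcs : r2.2 with
            | nil => exact absurd hcs hne2
            | cons a l => simp
          rw [hhd] at hx
          have hxm : x ∈ r2.2 := List.mem_of_mem_head? hx
          rw [hall2 x hxm, hflag]
      have hloop := tsRunLoop_spec d r.2 ((rest.map Prod.snd).flatten)
        (fun c hc => by rw [hall c hc, hf]) hRrest r.2.length 0 init rfl
      simp only [List.drop_zero] at hloop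
      rw [if_pos hf, hloop]
      simp
    · -- non-alphabetic run: copied verbatim
      have hf' : r.1 = false := by cases hb : r.1 with | false => rfl | true => exact absurd hb hf
      rw [if_neg hf, List.map_cons, List.flatten_cons,
        tsSpec_nonalpha_append d r.2 _ (fun c hc => by rw [hall c hc, hf'])]
      simp

-- ===== VERDICT (by name: the statement is the Claim_ definition above) =====
theorem trigram_substitute_spec : Claim_equal_trigram_substitute := by
  intro plaintext tri_dict _
  unfold Spec_trigram_substitute trigram_substitute trigram_substitute_alt
  have hA := ts_fold_spec plaintext.toList tri_dict plaintext.toList.length 0 [] (by omega)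
  simp only [List.drop_zero, Nat.cast_zero] at hA
  rw [hA]
  have hruns := tsRuns_aux plaintext.toList [] ⟨by simp, List.isChain_nil⟩
  have hB := tsProcess_spec tri_dict (tsRuns plaintext.toList) [] hruns.1
  rw [show (List.foldl tsRunsStep [] plaintext.toList) = tsRuns plaintext.toList from rfl] at hruns
  rw [hB, hruns.2]
  simp
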